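-- pv_equiv track=rewrite | github.com/vunguyenq/adventofcode2020 | 15.RambunctiousRecitation.py | list_rindex
-- ===== SOURCE A (Python) =====
-- def list_rindex(li, x, offset = 0):
--     counter = 0
--     for i in reversed(range(len(li))):
--         if li[i] == x:
--             if counter == offset:
--                 return i
--             counter += 1
--     raise ValueError("{} is not in list".format(x))
-- ===== SOURCE B (Python) =====
-- def list_rindex(li, x, offset=0):
--     idx = [i for i, v in enumerate(li) if v == x]
--     if 0 <= offset < len(idx):
--         return idx[len(idx) - 1 - offset]
--     raise ValueError("{} is not in list".format(x))
-- ===== Notes on version B (the rewrite author's own statement) =====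
-- stated objective: simpler
-- what changed: replaces the reversed scan with an early-return counter by a forward index-table comprehension plus a single arithmetic pick of the offset-th match from the right
import Mathlib
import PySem

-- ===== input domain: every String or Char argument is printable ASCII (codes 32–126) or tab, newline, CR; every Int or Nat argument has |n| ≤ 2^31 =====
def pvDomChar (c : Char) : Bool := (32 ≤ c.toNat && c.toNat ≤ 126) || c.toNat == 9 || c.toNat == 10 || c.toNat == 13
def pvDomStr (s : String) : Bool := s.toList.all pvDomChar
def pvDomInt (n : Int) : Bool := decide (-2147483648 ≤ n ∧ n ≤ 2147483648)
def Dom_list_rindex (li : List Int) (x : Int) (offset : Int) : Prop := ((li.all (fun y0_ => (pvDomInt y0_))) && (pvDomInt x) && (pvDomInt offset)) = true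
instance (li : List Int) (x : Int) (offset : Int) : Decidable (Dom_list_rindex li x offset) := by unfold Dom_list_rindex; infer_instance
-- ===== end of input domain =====

-- B replaces A's reversed scan with a counter by a forward index table and one arithmetic pick (objective: simpler).

-- ===== PORT A =====
-- A's loop over reversed(range(len(li))) with the counter; the empty case is A's 'raise ValueError' (excluded by Pre_).
def list_rindex_go (li : List Int) (x : Int) (offset : Int) : List Int → Int → Int
  | [], _ => 0
  | i :: rest, counter =>
    if PySem.List.pyGet? li i = some x then
      if counter = offset then i
      else list_rindex_go li x offset rest (counter + 1)
    else list_rindex_go li x offset rest counter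

def list_rindex (li : List Int) (x : Int) (offset : Int) : Int :=
  list_rindex_go li x offset ((PySem.List.pyRange 0 (li.length : Int) 1).reverse) 0

-- ===== PORT B =====
def list_rindex_alt (li : List Int) (x : Int) (offset : Int) : Int :=
  let idx : List Int := ((PySem.List.enumerate li 0).filter (fun p => p.2 == x)).map (fun p => p.1)
  if 0 ≤ offset ∧ offset < (idx.length : Int) then
    (PySem.List.pyGet? idx ((idx.length : Int) - 1 - offset)).getD 0
  else 0  -- raise ValueError (excluded by Pre_)

-- ===== PRECONDITION & SPEC =====
-- Pre_ excludes exactly the inputs on which A raises ValueError: offset negative, or fewer than offset+1 occurrences of x in li.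
def Pre_list_rindex (li : List Int) (x : Int) (offset : Int) : Prop :=
  0 ≤ offset ∧ offset < (li.count x : Int)
instance (li : List Int) (x : Int) (offset : Int) : Decidable (Pre_list_rindex li x offset) := by unfold Pre_list_rindex; infer_instance
def pvWitness_list_rindex : List Int × Int × Int := ([5, 3, 5, 7, 5], 5, 1)

def Spec_list_rindex (li : List Int) (x : Int) (offset : Int) (out : Int) : Prop := out = list_rindex_alt li x offset
instance (li : List Int) (x : Int) (offset : Int) (out : Int) : Decidable (Spec_list_rindex li x offset out) := by unfold Spec_list_rindex; infer_instance

-- ===== CLAIM (what is proved, stated in full; the proofs are below) =====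
def Claim_equal_list_rindex : Prop := ∀ (li : List Int) (x : Int) (offset : Int), Dom_list_rindex li x offset → Pre_list_rindex li x offset → Spec_list_rindex li x offset (list_rindex li x offset)

-- ===== LEMMAS AND PROOFS =====

-- A's loop returns the (offset - counter)-th element of the matching indices of the remaining scan order.
theorem list_rindex_go_eq (li : List Int) (x offset : Int) (is : List Int) (counter : Int)
    (h0 : 0 ≤ offset - counter)
    (h1 : offset - counter < ((is.filter (fun i => PySem.List.pyGet? li i == some x)).length : Int)) :
    list_rindex_go li x offset is counter =
      (is.filter (fun i => PySem.List.pyGet? li i == some x)).getD (offset - counter).toNat 0 := by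
  induction is generalizing counter with
  | nil => simp at h1; omega
  | cons i rest ih =>
    by_cases hm : PySem.List.pyGet? li i = some x
    · have hfc : (i :: rest).filter (fun i => PySem.List.pyGet? li i == some x)
          = i :: rest.filter (fun i => PySem.List.pyGet? li i == some x) := by
        simp [hm]
      rw [hfc] at h1 ⊢
      by_cases hc : counter = offset
      · rw [show list_rindex_go li x offset (i :: rest) counter = i by
          simp [list_rindex_go, hm, hc]]
        have hz : (offset - counter).toNat = 0 := by omega
        rw [hz, List.getD_cons_zero]
      · rw [show list_rindex_go li x offset (i :: rest) counter
            = list_rindex_go li x offset rest (counter + 1) by simp [list_rindex_go, hm, hc]]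
        have h1' : offset - (counter + 1)
            < ((rest.filter (fun i => PySem.List.pyGet? li i == some x)).length : Int) := by
          rw [List.length_cons] at h1; push_cast at h1 ⊢; omega
        rw [ih (counter + 1) (by omega) h1']
        have hk : (offset - counter).toNat = (offset - (counter + 1)).toNat + 1 := by omega
        rw [hk, List.getD_cons_succ]
    · have hfc : (i :: rest).filter (fun i => PySem.List.pyGet? li i == some x)
          = rest.filter (fun i => PySem.List.pyGet? li i == some x) := by
        simp [hm]
      rw [hfc] at h1 ⊢
      rw [show list_rindex_go li x offset (i :: rest) counter
          = list_rindex_go li x offset rest counter by simp [list_rindex_go, hm]]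
      exact ih counter h0 h1

-- B's index table equals the forward range filtered to the matching positions.
theorem idx_eq (li : List Int) (x : Int) :
    ((PySem.List.enumerate li 0).filter (fun p => p.2 == x)).map (fun p => p.1)
      = (PySem.List.pyRange 0 (li.length : Int) 1).filter (fun i => PySem.List.pyGet? li i == some x) := by
  rw [PySem.List.enumerate_eq_map_pyRange li 0, PySem.List.len_eq, List.filter_map, List.map_map]
  have hcong : ∀ i ∈ PySem.List.pyRange 0 (li.length : Int) 1,
      ((fun p : Int × Int => p.2 == x) ∘ (fun j => (j, PySem.List.pyGetD li j 0))) i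
        = (PySem.List.pyGet? li i == some x) := by
    intro i hi
    rw [PySem.List.mem_pyRange_one] at hi
    rw [Function.comp_apply]
    rw [PySem.List.pyGet?_eq_some_getElem li hi.1 (by exact_mod_cast hi.2)]
    rw [PySem.List.pyGetD_eq_getElem li 0 hi.1 (by exact_mod_cast hi.2)]
    simp
  rw [List.filter_congr hcong]
  have hid : ((fun p : Int × Int => p.1) ∘ (fun j => (j, PySem.List.pyGetD li j 0))) = id := rfl
  rw [hid, List.map_id]

-- the matching-position table has length li.count x
theorem filter_length_eq_count (li : List Int) (x : Int) :
    ((PySem.List.pyRange 0 (li.length : Int) 1).filter (fun i => PySem.List.pyGet? li i == some x)).length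
      = li.count x := by
  rw [← idx_eq li x, List.length_map, ← List.countP_eq_length_filter]
  conv_rhs => rw [List.count_eq_countP, ← PySem.List.map_snd_enumerate li 0]
  rw [List.countP_map]
  rfl

-- ===== VERDICT (by name: the statement is the Claim_ definition above) =====
theorem list_rindex_spec : Claim_equal_list_rindex := by
  intro li x offset _ hpre
  obtain ⟨h0, h1⟩ := hpre
  unfold Spec_list_rindex list_rindex list_rindex_alt
  have hlen := filter_length_eq_count li x
  rw [list_rindex_go_eq li x offset _ 0 (by omega)
      (by simp only [List.filter_reverse, List.length_reverse, hlen]; omega)]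
  simp only [idx_eq li x, List.filter_reverse]
  rw [if_pos ⟨h0, by rw [hlen]; exact h1⟩]
  have hoff : offset.toNat
      < ((PySem.List.pyRange 0 (li.length : Int) 1).filter (fun i => PySem.List.pyGet? li i == some x)).length := by
    omega
  rw [PySem.List.pyGet?_of_nonneg _ (by omega)]
  have hnat : ((((PySem.List.pyRange 0 (li.length : Int) 1).filter
        (fun i => PySem.List.pyGet? li i == some x)).length : Int) - 1 - offset).toNat
      = ((PySem.List.pyRange 0 (li.length : Int) 1).filter
        (fun i => PySem.List.pyGet? li i == some x)).length - 1 - offset.toNat := by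
    omega
  rw [hnat, List.getElem?_eq_getElem (by omega), Option.getD_some]
  rw [show offset - 0 = offset from by ring]
  rw [List.getD_eq_getElem _ _ (by simpa using hoff)]
  rw [List.getElem_reverse]
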